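-- pv_equiv track=rewrite | github.com/htangden/symbol-parser | newline.py | newline_matching
-- ===== SOURCE A (Python) =====
-- def newline_matching(str1: str, str2: str):
--     arr1 = str1.split("\n")
--     arr2 = str2.split("\n")
--
--     s = ""
--
--     longest_arr1_element = len(max(arr1))
--
--     len_operator_1 = len(arr1[0])-2
--     len_operator_2 = len(arr2[0])-2
--     length = max(len(arr1), len(arr2))
--
--     for i in range(length):
--         try:
--             s += (arr1[i]) + " "*(longest_arr1_element-len(arr1[i]) + 1)
--         except IndexError:
--             s += " "*(longest_arr1_element+1)
--
--         try:
--             s += (arr2[i])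
--         except IndexError:
--             s +=(" ")
--
--         s += ("\n")
--
--     return s, longest_arr1_element, len_operator_1, len_operator_2
-- ===== SOURCE B (Python) =====
-- def newline_matching(str1: str, str2: str):
--     arr1 = str1.split("\n")
--     arr2 = str2.split("\n")
--
--     longest_arr1_element = len(max(arr1))
--     len_operator_1 = len(arr1[0]) - 2
--     len_operator_2 = len(arr2[0]) - 2
--
--     n = max(len(arr1), len(arr2))
--     left = [e.ljust(longest_arr1_element + 1) for e in arr1]
--     left += [" " * (longest_arr1_element + 1)] * (n - len(arr1))
--     right = arr2 + [" "] * (n - len(arr2))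
--
--     s = "".join(l + r + "\n" for l, r in zip(left, right))
--     return s, longest_arr1_element, len_operator_1, len_operator_2
-- ===== Notes on version B (the rewrite author's own statement) =====
-- stated objective: alternative
-- what changed: Replaces the indexed loop with its try/except IndexError padding branches by a build-then-join decomposition: two aligned lists (left lines padded via ljust plus blank fillers, right lines plus single-space fillers) are built in separate passes and assembled with zip and ''.join.
import Mathlib
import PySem

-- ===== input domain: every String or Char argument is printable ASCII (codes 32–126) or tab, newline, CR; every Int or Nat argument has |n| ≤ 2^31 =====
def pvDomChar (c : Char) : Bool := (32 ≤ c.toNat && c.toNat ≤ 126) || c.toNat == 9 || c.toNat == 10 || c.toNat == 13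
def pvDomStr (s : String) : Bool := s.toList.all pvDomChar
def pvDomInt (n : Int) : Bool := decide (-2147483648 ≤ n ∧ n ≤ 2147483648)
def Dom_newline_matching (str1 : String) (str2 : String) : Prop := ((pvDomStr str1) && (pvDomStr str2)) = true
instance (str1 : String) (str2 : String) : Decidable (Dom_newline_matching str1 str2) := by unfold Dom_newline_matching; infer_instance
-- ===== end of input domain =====

-- B replaces A's indexed loop with try/except padding branches by a build-then-join
-- decomposition (two padded lists, zipped and joined); same cost, alternative structure.


-- ===== PORT A =====
-- strings are handled as their code-point lists (PySem.Chars); 'max(arr1)' is Python's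
-- lexicographic maximum = PySem.List.max? with identity key (arr1 is never empty, so getD [] is a totalization guard)
def newline_matching (str1 : String) (str2 : String) : String × Int × Int × Int :=
  let arr1 := PySem.Chars.splitOn str1.toList ['\n']
  let arr2 := PySem.Chars.splitOn str2.toList ['\n']
  let longest : Int := (((PySem.List.max? arr1 (fun x => x)).getD []).length : Int)
  let lenOp1 : Int := ((PySem.List.pyGetD arr1 0 []).length : Int) - 2
  let lenOp2 : Int := ((PySem.List.pyGetD arr2 0 []).length : Int) - 2
  let length := max arr1.length arr2.length
  let s := (List.range length).foldl (fun s i =>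
    -- try: s += arr1[i] + " "*(longest-len(arr1[i])+1)  except IndexError: s += " "*(longest+1)
    let s := match arr1[i]? with
      | some e => s ++ e ++ List.replicate (longest - (e.length : Int) + 1).toNat ' '
      | none   => s ++ List.replicate (longest + 1).toNat ' '
    -- try: s += arr2[i]  except IndexError: s += " "
    let s := match arr2[i]? with
      | some e => s ++ e
      | none   => s ++ [' ']
    s ++ ['\n']) []
  (String.mk s, longest, lenOp1, lenOp2)

-- ===== PORT B =====
-- e.ljust(w) on code-point lists (Nat subtraction = Python's no-op when e is already long enough)
def pvLjust (e : List Char) (w : Nat) : List Char := e ++ List.replicate (w - e.length) ' '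

def newline_matching_alt (str1 : String) (str2 : String) : String × Int × Int × Int :=
  let arr1 := PySem.Chars.splitOn str1.toList ['\n']
  let arr2 := PySem.Chars.splitOn str2.toList ['\n']
  let w : Nat := ((PySem.List.max? arr1 (fun x => x)).getD []).length
  let lenOp1 : Int := ((PySem.List.pyGetD arr1 0 []).length : Int) - 2
  let lenOp2 : Int := ((PySem.List.pyGetD arr2 0 []).length : Int) - 2
  let n := max arr1.length arr2.length
  let left := arr1.map (fun e => pvLjust e (w + 1)) ++
              List.replicate (n - arr1.length) (List.replicate (w + 1) ' ')
  let right := arr2 ++ List.replicate (n - arr2.length) [' ']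
  let s := PySem.Chars.join [] ((left.zip right).map (fun p => p.1 ++ p.2 ++ ['\n']))
  (String.mk s, (w : Int), lenOp1, lenOp2)

-- ===== PRECONDITION & SPEC =====
def Spec_newline_matching (str1 : String) (str2 : String) (out : String × Int × Int × Int) : Prop := out = newline_matching_alt str1 str2
instance (str1 : String) (str2 : String) (out : String × Int × Int × Int) : Decidable (Spec_newline_matching str1 str2 out) := by unfold Spec_newline_matching; infer_instance

-- ===== CLAIM (what is proved, stated in full; the proofs are below) =====
def Claim_equal_newline_matching : Prop := ∀ (str1 : String) (str2 : String), Dom_newline_matching str1 str2 → Spec_newline_matching str1 str2 (newline_matching str1 str2)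

-- ===== LEMMAS AND PROOFS =====

-- per-row chunk of A's loop
def pvChunkA (arr1 arr2 : List (List Char)) (longest : Int) (i : Nat) : List Char :=
  (match arr1[i]? with
    | some e => e ++ List.replicate (longest - (e.length : Int) + 1).toNat ' '
    | none   => List.replicate (longest + 1).toNat ' ') ++
  (match arr2[i]? with
    | some e => e
    | none   => [' ']) ++ ['\n']

lemma pv_foldl_chunks (g : Nat → List Char) :
    ∀ (n : Nat) (init : List Char),
      (List.range n).foldl (fun s i => s ++ g i) init = init ++ ((List.range n).map g).flatten := by
  intro n
  induction n with
  | zero => simp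
  | succ k ih =>
    intro init
    simp [List.range_succ, ih, List.append_assoc]

lemma pv_join_nil_eq_flatten : ∀ (xs : List (List Char)), PySem.Chars.join [] xs = xs.flatten := by
  intro xs
  induction xs with
  | nil => simp [PySem.Chars.join_nil]
  | cons x t ih =>
    cases t with
    | nil => simp [PySem.Chars.join_singleton]
    | cons y r => simp [PySem.Chars.join_cons_cons, ih]

lemma pv_foldlA_eq (arr1 arr2 : List (List Char)) (longest : Int) (n : Nat) :
    (List.range n).foldl (fun s i =>
      let s := match arr1[i]? with
        | some e => s ++ e ++ List.replicate (longest - (e.length : Int) + 1).toNat ' '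
        | none   => s ++ List.replicate (longest + 1).toNat ' '
      let s := match arr2[i]? with
        | some e => s ++ e
        | none   => s ++ [' ']
      s ++ ['\n']) [] = ((List.range n).map (pvChunkA arr1 arr2 longest)).flatten := by
  have hbody : (fun (s : List Char) (i : Nat) =>
      let s := match arr1[i]? with
        | some e => s ++ e ++ List.replicate (longest - (e.length : Int) + 1).toNat ' '
        | none   => s ++ List.replicate (longest + 1).toNat ' '
      let s := match arr2[i]? with
        | some e => s ++ e
        | none   => s ++ [' ']
      s ++ ['\n']) = (fun s i => s ++ pvChunkA arr1 arr2 longest i) := by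
    funext s i
    cases h1 : arr1[i]? <;> cases h2 : arr2[i]? <;>
      simp [pvChunkA, h1, h2, List.append_assoc]
  rw [hbody, pv_foldl_chunks]
  simp

-- the zipped, padded lists of B produce exactly A's per-row chunks
lemma pv_zip_eq_chunks (arr1 arr2 : List (List Char)) (w : Nat) :
    (((arr1.map (fun e => pvLjust e (w + 1)) ++
        List.replicate ((max arr1.length arr2.length) - arr1.length) (List.replicate (w + 1) ' ')).zip
      (arr2 ++ List.replicate ((max arr1.length arr2.length) - arr2.length) [' '])).map
        (fun p => p.1 ++ p.2 ++ ['\n'])) =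
    (List.range (max arr1.length arr2.length)).map (pvChunkA arr1 arr2 (w : Int)) := by
  set n := max arr1.length arr2.length with hn
  have h1 : arr1.length ≤ n := le_max_left _ _
  have h2 : arr2.length ≤ n := le_max_right _ _
  have hlenL : (arr1.map (fun e => pvLjust e (w + 1)) ++
      List.replicate (n - arr1.length) (List.replicate (w + 1) ' ')).length = n := by
    simp; omega
  have hlenR : (arr2 ++ List.replicate (n - arr2.length) ([' '] : List Char)).length = n := by
    simp; omega
  apply List.ext_getElem
  · simp [hlenL, hlenR]
  · intro i hi hi'
    have hin : i < n := by simpa [hlenL, hlenR] using hi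
    simp only [List.getElem_map, List.getElem_zip, List.getElem_range]
    congr 1
    · -- left[i] ++ right[i] vs chunk's first two pieces
      congr 1
      · -- left part
        by_cases hc : i < arr1.length
        · rw [List.getElem_append_left (by simpa using hc)]
          simp only [List.getElem_map]
          have : arr1[i]? = some arr1[i] := List.getElem?_eq_getElem hc
          rw [this]
          simp only [pvLjust]
          congr 1
          congr 1
          omega
        · rw [List.getElem_append_right (by simpa using hc)]
          have : arr1[i]? = none := List.getElem?_eq_none (by omega)
          rw [this]
          simp only [List.getElem_replicate]
          have hw : ((w : Int) + 1).toNat = w + 1 := by omega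
          rw [hw]
      · -- right part
        by_cases hc : i < arr2.length
        · rw [List.getElem_append_left hc]
          have : arr2[i]? = some arr2[i] := List.getElem?_eq_getElem hc
          rw [this]
        · rw [List.getElem_append_right (by omega)]
          have : arr2[i]? = none := List.getElem?_eq_none (by omega)
          rw [this]
          simp

-- ===== VERDICT (by name: the statement is the Claim_ definition above) =====
theorem newline_matching_spec : Claim_equal_newline_matching := by
  intro str1 str2 _
  unfold Spec_newline_matching newline_matching newline_matching_alt
  simp only []
  rw [pv_foldlA_eq, pv_join_nil_eq_flatten, pv_zip_eq_chunks]
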